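-- pv_equiv track=rewrite | github.com/LMU-Douglas/ps6-robertatlass | balancing_power.py | is_power_balanced
-- ===== SOURCE A (Python) =====
-- def is_power_balanced(n, party):
--     """
--     There are n legislators in the State of Confusion, each representing one of the three major parties:
--
--     Future One, Two-gether, and Triple Harmony.
--
--     The founders of the State envisioned a healthy society where the three parties maintain
--     the balance of power and no party gets a dictatorial position by having too many legislators.
--
--     Formally, we say that the balance of power is achieved when no one party has strictly
--     more legislators than the other two parties combined.
--
--     The function input will have 2 paramaters. The first will be the total number of legislators (n),
--     the second will be n space-separated integers, representing the party aﬃliation of each elected person,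
--     1 being Futre One, 2 being Two-gether, 3 being Triple Harmony.
--
--     The function will output a string on a single line, representing the headline of the article you will write.
--
--     TODO: If the balance of power is achieved, then print only “Power Balanced” without quotation marks.
--     Otherwise, print only “[Party] Dominates” without quotation marks, where “[Party]” is replaced with the name of the winning party.
--
--     Note that the output is case-sensitive, and must match the format exactly without leading or trailing whitespace.
--     """
--
--     future_one = 0
--     two_gether = 0
--     triple_harmony = 0
--
--     for p in party.split():
--         if p == '1':
--             future_one += 1
--         elif p == '2':
--             two_gether += 1
--         elif p == '3':
--             triple_harmony += 1
--
--     if future_one > two_gether + triple_harmony: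
--         return "Future One Dominates"
--     elif two_gether > future_one + triple_harmony:
--         return "Two-gether Dominates"
--     elif triple_harmony > future_one + two_gether:
--         return "Triple Harmony Dominates"
--     else:
--         return "Power Balanced"
--
--     return None # TODO: Implement this function
-- ===== SOURCE B (Python) =====
-- def is_power_balanced(n, party):
--     # Boyer-Moore majority vote over the valid tokens, then one verification count.
--     valid = [p for p in party.split() if p in ('1', '2', '3')]
--     cand = None
--     cnt = 0
--     for p in valid:
--         if cnt == 0:
--             cand, cnt = p, 1
--         elif p == cand:
--             cnt += 1
--         else:
--             cnt -= 1
--     if cand is not None and 2 * valid.count(cand) > len(valid):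
--         if cand == '1':
--             return 'Future One Dominates'
--         elif cand == '2':
--             return 'Two-gether Dominates'
--         else:
--             return 'Triple Harmony Dominates'
--     return 'Power Balanced'
-- ===== Notes on version B (the rewrite author's own statement) =====
-- stated objective: alternative
-- what changed: Replaces A's three-counter tally with pairwise comparisons by the Boyer-Moore majority-vote algorithm: a single cancellation pass over the valid tokens keeping one candidate and a counter, followed by one verification count of the candidate (a party dominates iff it is a strict majority of the valid tokens).
import Mathlib
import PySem

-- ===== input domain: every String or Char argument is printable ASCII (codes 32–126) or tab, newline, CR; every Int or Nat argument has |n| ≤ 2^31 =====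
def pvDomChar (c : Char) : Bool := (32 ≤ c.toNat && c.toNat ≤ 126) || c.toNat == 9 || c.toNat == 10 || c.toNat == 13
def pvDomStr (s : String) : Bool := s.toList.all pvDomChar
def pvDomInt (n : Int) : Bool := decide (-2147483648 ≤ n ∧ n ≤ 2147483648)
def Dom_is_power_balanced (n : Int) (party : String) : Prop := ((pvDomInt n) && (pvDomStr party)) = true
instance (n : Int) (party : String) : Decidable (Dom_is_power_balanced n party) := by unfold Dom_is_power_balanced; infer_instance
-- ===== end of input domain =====

-- B replaces A's three-counter tally with the Boyer-Moore majority vote (cancellation pass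
-- with one candidate and a counter, then one verification count); objective: alternative.

-- ===== PORT A =====
-- the loop over party.split() carrying (future_one, two_gether, triple_harmony)
def is_power_balanced (n : Int) (party : String) : String :=
  let s := (PySem.Str.split₀ party).foldl
    (fun (s : Int × Int × Int) p =>
      if p == "1" then (s.1 + 1, s.2.1, s.2.2)
      else if p == "2" then (s.1, s.2.1 + 1, s.2.2)
      else if p == "3" then (s.1, s.2.1, s.2.2 + 1)
      else s) (0, 0, 0)
  let future_one := s.1
  let two_gether := s.2.1
  let triple_harmony := s.2.2
  if future_one > two_gether + triple_harmony then "Future One Dominates"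
  else if two_gether > future_one + triple_harmony then "Two-gether Dominates"
  else if triple_harmony > future_one + two_gether then "Triple Harmony Dominates"
  else "Power Balanced"

-- ===== PORT B =====
-- Boyer-Moore step: state = (cand : Option String, cnt : Int)
def bmStep (s : Option String × Int) (p : String) : Option String × Int :=
  if s.2 == 0 then (some p, 1)
  else if some p == s.1 then (s.1, s.2 + 1)
  else (s.1, s.2 - 1)

def is_power_balanced_alt (n : Int) (party : String) : String :=
  let valid := (PySem.Str.split₀ party).filter (fun p => p == "1" || p == "2" || p == "3")
  let s := valid.foldl bmStep (none, 0)
  match s.1 with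
  | none => "Power Balanced"
  | some cand =>
    if 2 * (PySem.List.count valid cand) > (valid.length : Int) then
      if cand == "1" then "Future One Dominates"
      else if cand == "2" then "Two-gether Dominates"
      else "Triple Harmony Dominates"
    else "Power Balanced"

-- ===== PRECONDITION & SPEC =====
def Spec_is_power_balanced (n : Int) (party : String) (out : String) : Prop := out = is_power_balanced_alt n party
instance (n : Int) (party : String) (out : String) : Decidable (Spec_is_power_balanced n party out) := by unfold Spec_is_power_balanced; infer_instance

-- ===== CLAIM (what is proved, stated in full; the proofs are below) =====
def Claim_equal_is_power_balanced : Prop := ∀ (n : Int) (party : String), Dom_is_power_balanced n party → Spec_is_power_balanced n party (is_power_balanced n party)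

-- ===== LEMMAS AND PROOFS =====

-- A's loop computes exactly the three token counts
lemma fold_counts (l : List String) (a b c : Int) :
    l.foldl (fun (s : Int × Int × Int) p =>
      if p == "1" then (s.1 + 1, s.2.1, s.2.2)
      else if p == "2" then (s.1, s.2.1 + 1, s.2.2)
      else if p == "3" then (s.1, s.2.1, s.2.2 + 1)
      else s) (a, b, c)
    = (a + l.count "1", b + l.count "2", c + l.count "3") := by
  induction l generalizing a b c with
  | nil => simp
  | cons x t ih =>
    rw [List.foldl_cons]
    have hc : ∀ v : String, ((x :: t).count v : Int) = (t.count v : Int) + (if x == v then 1 else 0) := by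
      intro v; rw [List.count_cons]; split <;> push_cast <;> ring
    by_cases h1 : x = "1"
    · subst h1
      show List.foldl _ ((a : Int) + 1, (b : Int), (c : Int)) t = _
      rw [ih, Prod.mk.injEq, Prod.mk.injEq, hc "1", hc "2", hc "3"]
      refine ⟨by simp; ring, by simp, by simp⟩
    · by_cases h2 : x = "2"
      · subst h2
        show List.foldl _ ((a : Int), (b : Int) + 1, (c : Int)) t = _
        rw [ih, Prod.mk.injEq, Prod.mk.injEq, hc "1", hc "2", hc "3"]
        refine ⟨by simp, by simp; ring, by simp⟩
      · by_cases h3 : x = "3"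
        · subst h3
          show List.foldl _ ((a : Int), (b : Int), (c : Int) + 1) t = _
          rw [ih, Prod.mk.injEq, Prod.mk.injEq, hc "1", hc "2", hc "3"]
          refine ⟨by simp, by simp, by simp; ring⟩
        · have e1 : (x == "1") = false := beq_eq_false_iff_ne.mpr h1
          have e2 : (x == "2") = false := beq_eq_false_iff_ne.mpr h2
          have e3 : (x == "3") = false := beq_eq_false_iff_ne.mpr h3
          rw [if_neg (by simp [e1]), if_neg (by simp [e2]), if_neg (by simp [e3]), ih, Prod.mk.injEq, Prod.mk.injEq, hc "1", hc "2", hc "3"]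
          refine ⟨by simp [e1], by simp [e2], by simp [e3]⟩

-- weight of a value in a Boyer-Moore state
def bmW (s : Option String × Int) (v : String) : Int := if s.1 = some v then s.2 else -s.2

-- the Boyer-Moore invariant: the counter stays nonnegative and, for every value v,
-- 2·count v can grow over the pass by at most length + (change of v's weight)
lemma bm_inv (l : List String) (s : Option String × Int) (hk : 0 ≤ s.2) :
    0 ≤ (l.foldl bmStep s).2 ∧
    ∀ v, 2 * (l.count v : Int) + bmW s v ≤ (l.length : Int) + bmW (l.foldl bmStep s) v := by
  induction l generalizing s with
  | nil => exact ⟨hk, fun v => by simp⟩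
  | cons x t ih =>
    rw [List.foldl_cons]
    have hstep : 0 ≤ (bmStep s x).2 ∧ ∀ v,
        2 * (if x = v then (1:Int) else 0) + bmW s v ≤ 1 + bmW (bmStep s x) v := by
      obtain ⟨c, k⟩ := s
      simp only [bmStep]
      by_cases h0 : k = 0
      · rw [if_pos (by simpa using h0)]
        refine ⟨by norm_num, fun v => ?_⟩
        simp only [bmW, h0]
        by_cases hv : x = v
        · rw [if_pos hv, if_pos (show (some x, (1:Int)).1 = some v by simpa using hv)]
          split_ifs <;> omega
        · rw [if_neg hv, if_neg (show (some x, (1:Int)).1 ≠ some v by simpa using hv)]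
          split_ifs <;> omega
      · rw [if_neg (by simpa using h0)]
        by_cases hm : some x = c
        · rw [if_pos (by simpa using hm)]
          refine ⟨by simp at hk ⊢; omega, fun v => ?_⟩
          simp only [bmW]
          by_cases hv : x = v
          · subst hv
            rw [if_pos rfl, if_pos hm.symm, if_pos (show ((c, k + 1) : Option String × Int).1 = some x from hm.symm)]
            omega
          · have hc : c ≠ some v := by rw [← hm]; simpa using hv
            rw [if_neg hv, if_neg hc, if_neg (show ((c, k + 1) : Option String × Int).1 ≠ some v from hc)]
            omega
        · rw [if_neg (by simpa using hm)]
          refine ⟨by simp at hk ⊢; omega, fun v => ?_⟩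
          simp only [bmW]
          by_cases hv : x = v
          · subst hv
            have hc : c ≠ some x := fun h => hm h.symm
            rw [if_pos rfl, if_neg hc, if_neg (show ((c, k - 1) : Option String × Int).1 ≠ some x from hc)]
            omega
          · by_cases hc : c = some v
            · rw [if_neg hv, if_pos hc, if_pos (show ((c, k - 1) : Option String × Int).1 = some v from hc)]
              omega
            · rw [if_neg hv, if_neg hc, if_neg (show ((c, k - 1) : Option String × Int).1 ≠ some v from hc)]
              omega
    obtain ⟨h1, h2⟩ := ih (bmStep s x) hstep.1
    refine ⟨h1, fun v => ?_⟩
    have := h2 v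
    have := hstep.2 v
    have hcx : ((x :: t).count v : Int) = (t.count v : Int) + (if x = v then 1 else 0) := by
      rw [List.count_cons]; split <;> push_cast <;> simp_all
    simp only [hcx, List.length_cons]
    push_cast
    omega

-- a strict majority element is the final Boyer-Moore candidate
lemma bm_majority (l : List String) (m : String)
    (h : 2 * (l.count m : Int) > (l.length : Int)) :
    (l.foldl bmStep (none, 0)).1 = some m := by
  obtain ⟨hk, hv⟩ := bm_inv l (none, 0) le_rfl
  have := hv m
  by_contra hne
  simp [bmW, hne] at this
  omega

-- counts of the three tokens survive the validity filter
lemma count_filter_valid (l : List String) (v : String) (hv : (v == "1" || v == "2" || v == "3") = true) :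
    (l.filter (fun p => p == "1" || p == "2" || p == "3")).count v = l.count v :=
  List.count_filter hv

-- the filtered list's length is the sum of the three counts
lemma len_valid (l : List String) :
    ((l.filter (fun p => p == "1" || p == "2" || p == "3")).length : Int)
      = (l.count "1" : Int) + l.count "2" + l.count "3" := by
  induction l with
  | nil => simp
  | cons x t ih =>
    by_cases h1 : x = "1"
    · subst h1; simp [List.count_cons]; omega
    · by_cases h2 : x = "2"
      · subst h2; simp [List.count_cons]; omega
      · by_cases h3 : x = "3"
        · subst h3; simp [List.count_cons]; omega
        · simp [List.filter_cons, h1, h2, h3, ih,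
            beq_eq_false_iff_ne.mpr h1, beq_eq_false_iff_ne.mpr h2, beq_eq_false_iff_ne.mpr h3]

-- an element outside {1,2,3} does not occur in the filtered list
lemma count_other (l : List String) (v : String) (hv : (v == "1" || v == "2" || v == "3") = false) :
    (l.filter (fun p => p == "1" || p == "2" || p == "3")).count v = 0 := by
  rw [List.count_eq_zero]
  intro hmem
  have := List.of_mem_filter hmem
  simp_all

-- ===== VERDICT (by name: the statement is the Claim_ definition above) =====
theorem is_power_balanced_spec : Claim_equal_is_power_balanced := by
  intro n party _
  show is_power_balanced n party = is_power_balanced_alt n party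
  unfold is_power_balanced is_power_balanced_alt
  simp only [fold_counts, zero_add, PySem.List.count_eq]
  set toks := PySem.Str.split₀ party with htoks
  set valid := toks.filter (fun p => p == "1" || p == "2" || p == "3") with hvalid
  have hc1 : valid.count "1" = toks.count "1" := count_filter_valid toks "1" (by decide)
  have hc2 : valid.count "2" = toks.count "2" := count_filter_valid toks "2" (by decide)
  have hc3 : valid.count "3" = toks.count "3" := count_filter_valid toks "3" (by decide)
  have hlen : (valid.length : Int) = (toks.count "1" : Int) + toks.count "2" + toks.count "3" :=
    len_valid toks
  by_cases hd1 : (toks.count "1" : Int) > (toks.count "2" : Int) + (toks.count "3" : Int)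
  · have hmaj : 2 * (valid.count "1" : Int) > (valid.length : Int) := by rw [hc1, hlen]; omega
    rw [if_pos hd1, bm_majority valid "1" hmaj]
    simp only [if_pos hmaj]
    rfl
  · by_cases hd2 : (toks.count "2" : Int) > (toks.count "1" : Int) + (toks.count "3" : Int)
    · have hmaj : 2 * (valid.count "2" : Int) > (valid.length : Int) := by rw [hc2, hlen]; omega
      rw [if_neg hd1, if_pos hd2, bm_majority valid "2" hmaj]
      simp only [if_pos hmaj]
      rfl
    · by_cases hd3 : (toks.count "3" : Int) > (toks.count "1" : Int) + (toks.count "2" : Int)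
      · have hmaj : 2 * (valid.count "3" : Int) > (valid.length : Int) := by rw [hc3, hlen]; omega
        rw [if_neg hd1, if_neg hd2, if_pos hd3, bm_majority valid "3" hmaj]
        simp only [if_pos hmaj]
        rfl
      · rw [if_neg hd1, if_neg hd2, if_neg hd3]
        match hcand : (valid.foldl bmStep (none, 0)).1 with
        | none => rfl
        | some cand =>
          have hno : ¬ 2 * (valid.count cand : Int) > (valid.length : Int) := by
            by_cases hv : (cand == "1" || cand == "2" || cand == "3") = true
            · rcases (by simpa using hv : (cand = "1" ∨ cand = "2") ∨ cand = "3") with (h | h) | h <;>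
                subst h <;> simp only [hc1, hc2, hc3, hlen] <;> omega
            · rw [count_other toks cand (by simpa using hv)]
              have : (0:Int) ≤ (valid.length : Int) := by positivity
              omega
          simp [hno]
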